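-- pv_equiv track=rewrite | github.com/LaMemeBete/TP-INFORMATIQUE | tp-6.py | liste_diviseurs_pairs
-- ===== SOURCE A (Python) =====
-- def liste_diviseurs_pairs(a):
-- 	i = 1
-- 	listToReturn = [];
-- 	while i <= a:
-- 		if(a%i == 0 and i%2 == 0):
-- 			listToReturn.append(i);
-- 		i = i +1
-- 	return listToReturn
-- ===== SOURCE B (Python) =====
-- def liste_diviseurs_pairs(a):
--     divs = set()
--     d = 1
--     while d * d <= a:
--         if a % d == 0:
--             divs.add(d)
--             divs.add(a // d)
--         d += 1
--     return sorted(x for x in divs if x % 2 == 0)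
-- ===== Notes on version B (the rewrite author's own statement) =====
-- stated objective: faster
-- what changed: Replaces the linear scan of every i in 1..a by enumeration of divisor pairs (d, a//d) up to sqrt(a), then filters the even ones and sorts ascending.
import Mathlib
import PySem

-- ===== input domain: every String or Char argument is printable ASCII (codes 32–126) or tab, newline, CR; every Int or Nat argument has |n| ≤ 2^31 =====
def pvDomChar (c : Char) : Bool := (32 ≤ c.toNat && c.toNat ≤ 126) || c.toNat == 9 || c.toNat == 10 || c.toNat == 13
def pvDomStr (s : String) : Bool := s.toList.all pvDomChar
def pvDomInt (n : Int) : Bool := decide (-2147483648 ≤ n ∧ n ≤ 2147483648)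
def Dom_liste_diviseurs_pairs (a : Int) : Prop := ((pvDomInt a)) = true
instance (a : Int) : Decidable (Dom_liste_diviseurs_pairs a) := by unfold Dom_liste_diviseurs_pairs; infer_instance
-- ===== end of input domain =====

-- B replaces A's scan of every i in 1..a by divisor-pair enumeration up to sqrt(a),
-- filtering the even divisors and sorting ascending.

-- ===== PORT A =====
-- while i <= a: if a%i==0 and i%2==0: append i; i += 1
def pvLoopA (a i : Int) (acc : List Int) : List Int :=
  if _h : i ≤ a then
    pvLoopA a (i + 1)
      (if PySem.Int.mod a i == 0 && PySem.Int.mod i 2 == 0 then acc ++ [i] else acc)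
  else acc
termination_by (a + 1 - i).toNat
decreasing_by omega

def liste_diviseurs_pairs (a : Int) : List Int := pvLoopA a 1 []

-- ===== PORT B =====
-- while d*d <= a: if a%d==0: divs.add(d); divs.add(a//d); d += 1
def pvLoopB (a d : Int) (s : PySem.Set Int) : PySem.Set Int :=
  if _h : d * d ≤ a then
    pvLoopB a (d + 1)
      (if PySem.Int.mod a d == 0 then
        PySem.Set.add (PySem.Set.add s d) (PySem.Int.floordiv a d) else s)
  else s
termination_by (a + 1 - d).toNat
decreasing_by
  have hd : d ≤ a := by nlinarith [mul_self_nonneg d, mul_self_nonneg (d - 1)]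
  omega

-- sorted(x for x in divs if x % 2 == 0)
def liste_diviseurs_pairs_alt (a : Int) : List Int :=
  PySem.List.sorted
    ((pvLoopB a 1 PySem.Set.empty).filter (fun x => PySem.Int.mod x 2 == 0))
    (fun x => x) false

-- ===== PRECONDITION & SPEC =====
def Spec_liste_diviseurs_pairs (a : Int) (out : List Int) : Prop := out = liste_diviseurs_pairs_alt a
instance (a : Int) (out : List Int) : Decidable (Spec_liste_diviseurs_pairs a out) := by unfold Spec_liste_diviseurs_pairs; infer_instance

-- ===== CLAIM (what is proved, stated in full; the proofs are below) =====
def Claim_equal_liste_diviseurs_pairs : Prop := ∀ (a : Int), Dom_liste_diviseurs_pairs a → Spec_liste_diviseurs_pairs a (liste_diviseurs_pairs a)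

-- ===== LEMMAS AND PROOFS =====

-- A's loop is the filter of the range 1..a
theorem pvLoopA_eq (a i : Int) (acc : List Int) :
    pvLoopA a i acc =
      acc ++ (PySem.List.pyRange i (a + 1) 1).filter
        (fun x => PySem.Int.mod a x == 0 && PySem.Int.mod x 2 == 0) := by
  fun_induction pvLoopA a i acc with
  | case1 i acc h ih =>
    simp only [dite_eq_ite] at ih
    rw [ih, PySem.List.pyRange_one_cons (a := i) (b := a + 1) (by omega), List.filter_cons]
    split_ifs <;> simp
  | case2 i acc h =>
    rw [PySem.List.pyRange_one_eq_nil (by omega)]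
    simp

theorem nodup_pvLoopB (a d : Int) (s : PySem.Set Int) (hs : s.Nodup) :
    (pvLoopB a d s).Nodup := by
  revert hs
  fun_induction pvLoopB a d s with
  | case1 d s h ih =>
    simp only [dite_eq_ite] at ih
    intro hs
    apply ih
    split
    · exact PySem.Set.nodup_add _ _ (PySem.Set.nodup_add _ _ hs)
    · exact hs
  | case2 d s h => exact id

-- membership in B's set: exactly the values hit by a divisor pair (e, a/e) with e*e ≤ a, e ≥ d
theorem mem_pvLoopB (a x d : Int) (s : PySem.Set Int) :
    1 ≤ d →
    (x ∈ pvLoopB a d s ↔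
      x ∈ s ∨ ∃ e, d ≤ e ∧ e * e ≤ a ∧ a % e = 0 ∧ (x = e ∨ x = a / e)) := by
  fun_induction pvLoopB a d s with
  | case1 d s h ih =>
    intro hd
    simp only [dite_eq_ite] at ih
    rw [ih (by omega)]
    by_cases hm : PySem.Int.mod a d == 0
    · have hdvd : d ∣ a := (PySem.Int.mod_eq_zero_iff_dvd a d).mp (by simpa using hm)
      have hmod : a % d = 0 := Int.emod_eq_zero_of_dvd hdvd
      have hfd : PySem.Int.floordiv a d = a / d := PySem.Int.floordiv_eq_ediv_of_pos (by omega)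
      rw [if_pos hm]
      constructor
      · rintro (hx | ⟨e, he1, he2, he3, he4⟩)
        · rcases (PySem.Set.mem_add _ _ _).mp hx with hx' | hx'
          · rcases (PySem.Set.mem_add _ _ _).mp hx' with hx'' | hx''
            · exact Or.inl hx''
            · exact Or.inr ⟨d, le_refl d, h, hmod, Or.inl hx''⟩
          · exact Or.inr ⟨d, le_refl d, h, hmod, Or.inr (hfd ▸ hx')⟩
        · exact Or.inr ⟨e, by omega, he2, he3, he4⟩
      · rintro (hx | ⟨e, he1, he2, he3, he4⟩)
        · exact Or.inl ((PySem.Set.mem_add _ _ _).mpr (Or.inl ((PySem.Set.mem_add _ _ _).mpr (Or.inl hx))))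
        · by_cases hed : e = d
          · subst hed
            rcases he4 with h4 | h4
            · exact Or.inl ((PySem.Set.mem_add _ _ _).mpr (Or.inl ((PySem.Set.mem_add _ _ _).mpr (Or.inr h4))))
            · exact Or.inl ((PySem.Set.mem_add _ _ _).mpr (Or.inr (hfd ▸ h4)))
          · exact Or.inr ⟨e, by omega, he2, he3, he4⟩
    · have hdvd : ¬ d ∣ a := fun hc => hm (by simp [(PySem.Int.mod_eq_zero_iff_dvd a d).mpr hc])
      rw [if_neg hm]
      constructor
      · rintro (hx | ⟨e, he1, he2, he3, he4⟩)
        · exact Or.inl hx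
        · exact Or.inr ⟨e, by omega, he2, he3, he4⟩
      · rintro (hx | ⟨e, he1, he2, he3, he4⟩)
        · exact Or.inl hx
        · by_cases hed : e = d
          · subst hed
            exact absurd (Int.dvd_of_emod_eq_zero he3) hdvd
          · exact Or.inr ⟨e, by omega, he2, he3, he4⟩
  | case2 d s h =>
    intro hd
    simp only [iff_self_or]
    rintro ⟨e, he1, he2, he3, he4⟩
    have : d * d ≤ e * e := mul_le_mul he1 he1 (by omega) (by omega)
    omega

-- every divisor x of a in [1,a] is hit by some pair (e, a/e) with e*e ≤ a
theorem divisor_pair (a x : Int) (h1 : 1 ≤ x) (h2 : x ≤ a) (hd : x ∣ a) :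
    ∃ e, 1 ≤ e ∧ e * e ≤ a ∧ a % e = 0 ∧ (x = e ∨ x = a / e) := by
  rcases hd with ⟨q, rfl⟩
  have hq1 : 1 ≤ q := by nlinarith
  by_cases hxx : x * x ≤ x * q
  · exact ⟨x, h1, hxx, Int.emod_eq_zero_of_dvd (dvd_mul_right x q), Or.inl rfl⟩
  · have hqx : q < x := by nlinarith
    refine ⟨q, hq1, by nlinarith, Int.emod_eq_zero_of_dvd (dvd_mul_left q x), Or.inr ?_⟩
    rw [Int.mul_ediv_cancel _ (by omega)]

-- and conversely every member of a pair is such a divisor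
theorem pair_divisor (a x e : Int) (he : 1 ≤ e) (hee : e * e ≤ a)
    (hm : a % e = 0) (hx : x = e ∨ x = a / e) : 1 ≤ x ∧ x ≤ a ∧ x ∣ a := by
  have hd : e ∣ a := Int.dvd_of_emod_eq_zero hm
  have ha : 1 ≤ a := by nlinarith
  rcases hx with rfl | rfl
  · exact ⟨he, by nlinarith, hd⟩
  · refine ⟨?_, ?_, Int.ediv_dvd_of_dvd hd⟩
    · rw [Int.le_ediv_iff_mul_le (by omega)]; nlinarith
    · exact Int.ediv_le_self _ (by omega)

-- ===== VERDICT (by name: the statement is the Claim_ definition above) =====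
theorem liste_diviseurs_pairs_spec : Claim_equal_liste_diviseurs_pairs := by
  intro a _
  show liste_diviseurs_pairs a = liste_diviseurs_pairs_alt a
  unfold liste_diviseurs_pairs liste_diviseurs_pairs_alt
  rw [pvLoopA_eq, List.nil_append]
  by_cases ha : 1 ≤ a
  · -- name the sorted result: A's filter is a strictly increasing permutation of B's filtered set
    have hpw : ((PySem.List.pyRange 1 (a + 1) 1).filter
        (fun x => PySem.Int.mod a x == 0 && PySem.Int.mod x 2 == 0)).Pairwise (· < ·) :=
      List.Pairwise.filter _ (PySem.List.pairwise_lt_pyRange_one 1 (a + 1))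
    have hnodupA := hpw.imp (fun h => ne_of_lt h)
    have hnodupB : ((pvLoopB a 1 PySem.Set.empty).filter
        (fun x => PySem.Int.mod x 2 == 0)).Nodup :=
      (nodup_pvLoopB a 1 PySem.Set.empty List.nodup_nil).filter _
    have hmem : ∀ x : Int,
        (x ∈ (PySem.List.pyRange 1 (a + 1) 1).filter
          (fun x => PySem.Int.mod a x == 0 && PySem.Int.mod x 2 == 0)) ↔
        (x ∈ (pvLoopB a 1 PySem.Set.empty).filter (fun x => PySem.Int.mod x 2 == 0)) := by
      intro x
      rw [List.mem_filter, List.mem_filter, mem_pvLoopB a x 1 PySem.Set.empty (le_refl 1)]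
      simp only [PySem.List.mem_pyRange_one, Bool.and_eq_true, beq_iff_eq,
        PySem.Int.mod_eq_zero_iff_dvd, PySem.Set.empty, List.not_mem_nil, false_or]
      constructor
      · rintro ⟨⟨hx1, hx2⟩, hxa, hx2'⟩
        obtain ⟨e, he1, he2, he3, he4⟩ := divisor_pair a x hx1 (by omega) hxa
        exact ⟨⟨e, he1, he2, he3, he4⟩, hx2'⟩
      · rintro ⟨⟨e, he1, he2, he3, he4⟩, hx2'⟩
        obtain ⟨g1, g2, g3⟩ := pair_divisor a x e he1 he2 he3 he4
        exact ⟨⟨g1, by omega⟩, g3, hx2'⟩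
    have hperm := (List.perm_ext_iff_of_nodup hnodupA hnodupB).mpr hmem
    exact (PySem.List.sorted_eq_of_perm_of_pairwise_lt _ _ _ hperm hpw).symm
  · -- a < 1: both sides are empty
    rw [PySem.List.pyRange_one_eq_nil (by omega), List.filter_nil]
    rw [pvLoopB, dif_neg (by nlinarith)]
    rfl
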